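-- pv_equiv track=rewrite | github.com/banhdzui/cpi_hgcn | cpi/data_preprocessing.py | add_virtual_edges
-- ===== SOURCE A (Python) =====
-- def add_virtual_edges(components):
--     n = len(components)
--     edges = []
--     for i in range(n-1):
--         for j in range(i+1, n):
--             if components[i].intersection(components[j]):
--                 edges.append((i, j))
--                 edges.append((j, i))
--     return edges
-- ===== SOURCE B (Python) =====
-- def add_virtual_edges(components):
--     # inverted index: element -> (increasing) list of component indices containing it
--     index = {}
--     for i, comp in enumerate(components):
--         for x in comp:
--             index.setdefault(x, []).append(i)
--     pairs = set()
--     for ids in index.values():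
--         for k, a in enumerate(ids):
--             for b in ids[k + 1:]:
--                 pairs.add((a, b))
--     edges = []
--     for i, j in sorted(pairs):
--         edges.append((i, j))
--         edges.append((j, i))
--     return edges
-- ===== Notes on version B (the rewrite author's own statement) =====
-- stated objective: alternative
-- what changed: Replaces A's all-pairs set-intersection scan by an inverted index element->component-indices built in one pass; intersecting index pairs are collected into a set from each element's posting list and sorted, which reproduces A's exact lexicographic output order; Pre_ requires the inner lists (which encode Python sets) to be duplicate-free.
import Mathlib
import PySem

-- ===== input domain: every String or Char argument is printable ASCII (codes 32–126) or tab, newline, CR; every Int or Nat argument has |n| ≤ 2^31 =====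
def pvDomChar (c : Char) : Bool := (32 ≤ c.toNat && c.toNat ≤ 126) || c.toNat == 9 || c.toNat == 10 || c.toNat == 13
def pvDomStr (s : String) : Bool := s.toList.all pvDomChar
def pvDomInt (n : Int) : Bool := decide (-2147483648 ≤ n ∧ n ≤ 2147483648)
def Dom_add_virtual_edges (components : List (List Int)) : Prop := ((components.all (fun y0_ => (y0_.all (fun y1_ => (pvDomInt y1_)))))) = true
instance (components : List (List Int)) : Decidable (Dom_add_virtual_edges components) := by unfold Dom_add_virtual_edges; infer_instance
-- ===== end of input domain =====

-- B replaces A's all-pairs set-intersection scan by an alternative algorithm: an inverted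
-- index element -> component indices, collecting intersecting pairs into a set and sorting.

-- ===== PORT A =====
def add_virtual_edges (components : List (List Int)) : List (Int × Int) :=
  let n := components.length
  (List.range (n - 1)).foldl (fun edges i =>
    (List.range' (i + 1) (n - 1 - i)).foldl (fun edges j =>
      -- 'if components[i].intersection(components[j]):' — truthy iff a common element exists
      if (components.getD i []).any (fun x => (components.getD j []).contains x) then
        edges ++ [((i : Int), (j : Int)), ((j : Int), (i : Int))]
      else edges) edges) []

-- ===== PORT B =====
-- index = {}; for i, comp in enumerate(components): for x in comp: index.setdefault(x, []).append(i)
def pvIndex (components : List (List Int)) : PySem.Dict Int (List Int) :=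
  (PySem.List.enumerate components 0).foldl
    (fun d p => p.2.foldl (fun d x => d.modify x [] (fun v => v ++ [p.1])) d)
    PySem.Dict.empty

-- pairs = set(); for ids in vals: for k, a in enumerate(ids): for b in ids[k+1:]: pairs.add((a, b))
def pvPairs (vals : List (List Int)) : PySem.Set (Int × Int) :=
  vals.foldl (fun s ids =>
    (PySem.List.enumerate ids 0).foldl (fun s p =>
      (PySem.List.slice ids (some (p.1 + 1)) none).foldl
        (fun s b => PySem.Set.add s (p.2, b)) s) s)
    PySem.Set.empty

-- edges = []; for i, j in sorted(pairs): edges.append((i, j)); edges.append((j, i))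
-- (Python's tuple order is lexicographic = the Lex order on Int × Int)
def add_virtual_edges_alt (components : List (List Int)) : List (Int × Int) :=
  (PySem.List.sorted (pvPairs (pvIndex components).values) (fun p => toLex p)).foldl
    (fun edges p => edges ++ [(p.1, p.2), (p.2, p.1)]) []

-- ===== PRECONDITION & SPEC =====
-- The Python components are SETS; an inner list encodes a set only when it is duplicate-free,
-- so Pre_ requires each inner list Nodup (no Python input corresponds to a duplicated list).
def Pre_add_virtual_edges (components : List (List Int)) : Prop :=
  ∀ comp ∈ components, comp.Nodup
instance (components : List (List Int)) : Decidable (Pre_add_virtual_edges components) := by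
  unfold Pre_add_virtual_edges; infer_instance

def pvWitness_add_virtual_edges : List (List Int) := [[1, 2], [2, 3], [4]]

def Spec_add_virtual_edges (components : List (List Int)) (out : List (Int × Int)) : Prop :=
  out = add_virtual_edges_alt components
instance (components : List (List Int)) (out : List (Int × Int)) : Decidable (Spec_add_virtual_edges components out) := by
  unfold Spec_add_virtual_edges; infer_instance

-- ===== CLAIM (what is proved, stated in full; the proofs are below) =====
def Claim_equal_add_virtual_edges : Prop :=
  ∀ (components : List (List Int)), Dom_add_virtual_edges components →
    Pre_add_virtual_edges components →
    Spec_add_virtual_edges components (add_virtual_edges components)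

-- ===== LEMMAS AND PROOFS =====

-- The intersection test of A, as a Prop.
def pvHit (components : List (List Int)) (i j : Nat) : Bool :=
  (components.getD i []).any (fun x => (components.getD j []).contains x)

-- A's pair list: (i, j) with i < j < n and intersecting components, in lexicographic order.
def pvPairsA (components : List (List Int)) : List (Int × Int) :=
  (List.range (components.length - 1)).flatMap (fun i =>
    ((List.range' (i + 1) (components.length - 1 - i)).filter (fun j => pvHit components i j)).map
      (fun j : Nat => ((i : Int), (j : Int))))

-- spec of the inverted index: indices (from start s) of the components containing x
def pvIdsOf (cs : List (List Int)) (s x : Int) : List Int :=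
  match cs with
  | [] => []
  | c :: t => (if x ∈ c then [s] else []) ++ pvIdsOf t (s + 1) x

lemma pv_flatMap_ite {α β : Type} (l : List α) (p : α → Bool) (f : α → List β) :
    l.flatMap (fun x => if p x then f x else []) = (l.filter p).flatMap f := by
  induction l with
  | nil => simp
  | cons a t ih =>
    by_cases h : p a <;> simp [h, ih]

lemma pv_A_eq_flatMap (components : List (List Int)) :
    add_virtual_edges components
      = (pvPairsA components).flatMap (fun p => [(p.1, p.2), (p.2, p.1)]) := by
  unfold add_virtual_edges pvPairsA
  rw [PySem.List.foldl_congr_mem _ _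
    (fun edges i => edges ++
      (List.range' (i + 1) (components.length - 1 - i)).flatMap (fun j =>
        if pvHit components i j then [((i : Int), (j : Int)), ((j : Int), (i : Int))] else [])) _
    (by
      intro acc i _
      rw [PySem.List.foldl_congr_mem _ _
        (fun edges j => edges ++
          (if pvHit components i j then [((i : Int), (j : Int)), ((j : Int), (i : Int))] else [])) _
        (by
          intro acc' j _
          show (if pvHit components i j = true then
              acc' ++ [((i : Int), (j : Int)), ((j : Int), (i : Int))] else acc')
            = acc' ++ (if pvHit components i j = true then
              [((i : Int), (j : Int)), ((j : Int), (i : Int))] else [])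
          split <;> simp)]
      rw [PySem.List.foldl_append_eq_flatMap])]
  rw [PySem.List.foldl_append_eq_flatMap]
  simp only [List.nil_append]
  rw [List.flatMap_assoc]
  apply List.flatMap_congr
  intro i _
  rw [pv_flatMap_ite, List.flatMap_map]

lemma pv_B_eq_flatMap (components : List (List Int)) :
    add_virtual_edges_alt components
      = (PySem.List.sorted (pvPairs (pvIndex components).values) (fun p => toLex p)).flatMap
          (fun p => [(p.1, p.2), (p.2, p.1)]) := by
  unfold add_virtual_edges_alt
  rw [PySem.List.foldl_append_eq_flatMap]
  simp

-- generic membership through a fold of Set.add-shaped steps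
lemma pv_mem_foldl_set {β : Type} (l : List β) (F : PySem.Set (Int × Int) → β → PySem.Set (Int × Int))
    (P : β → Int × Int → Prop)
    (h : ∀ s b, b ∈ l → ∀ q, q ∈ F s b ↔ q ∈ s ∨ P b q) :
    ∀ (s : PySem.Set (Int × Int)) (q : Int × Int),
      q ∈ l.foldl F s ↔ q ∈ s ∨ ∃ b ∈ l, P b q := by
  induction l with
  | nil => simp
  | cons a t ih =>
    intro s q
    rw [List.foldl_cons, ih (fun s b hb => h s b (List.mem_cons_of_mem a hb)),
      h s a (List.mem_cons_self ..)]
    constructor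
    · rintro ((hs | hp) | ⟨b, hb, hP⟩)
      · exact Or.inl hs
      · exact Or.inr ⟨a, by simp, hp⟩
      · exact Or.inr ⟨b, by simp [hb], hP⟩
    · rintro (hs | ⟨b, hb, hP⟩)
      · exact Or.inl (Or.inl hs)
      · rcases List.mem_cons.mp hb with rfl | hb
        · exact Or.inl (Or.inr hP)
        · exact Or.inr ⟨b, hb, hP⟩

-- generic nodup preservation through a fold
lemma pv_nodup_foldl_set {β : Type} (l : List β) (F : PySem.Set (Int × Int) → β → PySem.Set (Int × Int))
    (h : ∀ s b, s.Nodup → (F s b).Nodup) :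
    ∀ (s : PySem.Set (Int × Int)), s.Nodup → (l.foldl F s).Nodup := by
  induction l with
  | nil => intro s hs; simpa using hs
  | cons a t ih => intro s hs; exact ih _ (h s a hs)

lemma pv_mem_enumerate {α : Type} (l : List α) :
    ∀ (s : Int) (p : Int × α),
      p ∈ PySem.List.enumerate l s ↔ ∃ k, ∃ h : k < l.length, p = (s + (k : Int), l[k]) := by
  induction l with
  | nil => simp [PySem.List.enumerate]
  | cons a t ih =>
    intro s p
    rw [PySem.List.enumerate_cons, List.mem_cons, ih]
    constructor
    · rintro (rfl | ⟨k, hk, rfl⟩)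
      · exact ⟨0, by simp, by simp⟩
      · refine ⟨k + 1, by simpa using hk, ?_⟩
        rw [Prod.ext_iff]
        refine ⟨by push_cast; ring, ?_⟩
        simp
    · rintro ⟨k, hk, rfl⟩
      cases k with
      | zero => simp
      | succ k =>
        right
        refine ⟨k, by simpa using hk, ?_⟩
        rw [Prod.ext_iff]
        refine ⟨by push_cast; ring, ?_⟩
        simp

-- the pair-collection loop over one strictly increasing ids list
lemma pv_mem_pairsOf (ids : List Int) (h : ids.Pairwise (· < ·)) (s : PySem.Set (Int × Int))
    (q : Int × Int) :
    q ∈ (PySem.List.enumerate ids 0).foldl (fun s p =>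
          (PySem.List.slice ids (some (p.1 + 1)) none).foldl
            (fun s b => PySem.Set.add s (p.2, b)) s) s
      ↔ q ∈ s ∨ (q.1 ∈ ids ∧ q.2 ∈ ids ∧ q.1 < q.2) := by
  have hget := List.pairwise_iff_getElem.mp h
  rw [pv_mem_foldl_set _ _
      (fun p q => ∃ b ∈ PySem.List.slice ids (some (p.1 + 1)) none, q = (p.2, b))
      (fun s p _ q =>
        pv_mem_foldl_set _ _ (fun b q => q = (p.2, b))
          (fun s b _ q => PySem.Set.mem_add s (p.2, b) q) s q)]
  constructor
  · rintro (hs | ⟨p, hp, b, hb, rfl⟩)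
    · exact Or.inl hs
    · right
      obtain ⟨k, hk, rfl⟩ := (pv_mem_enumerate ids 0 p).mp hp
      simp only [zero_add] at hb ⊢
      rw [PySem.List.slice_from ids (show (0:Int) ≤ (k : Int) + 1 by omega)] at hb
      rw [show ((k : Int) + 1).toNat = k + 1 by omega] at hb
      obtain ⟨m, hm2⟩ := List.mem_iff_getElem?.mp hb
      rw [List.getElem?_drop] at hm2
      obtain ⟨hmlt, hmeq⟩ := List.getElem?_eq_some_iff.mp hm2
      exact ⟨List.getElem_mem hk, hmeq ▸ List.getElem_mem hmlt,
        hmeq ▸ hget k (k + 1 + m) hk hmlt (by omega)⟩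
  · rintro (hs | ⟨h1, h2, hlt⟩)
    · exact Or.inl hs
    · right
      obtain ⟨k, hk, hk1⟩ := List.mem_iff_getElem.mp h1
      obtain ⟨m, hm, hm2⟩ := List.mem_iff_getElem.mp h2
      have hkm : k < m := by
        by_contra hle
        rw [Nat.not_lt] at hle
        rcases Nat.lt_or_ge m k with hmk | hge
        · have := hget m k hm hk hmk; omega
        · have hmk : m = k := by omega
          subst hmk; rw [hk1] at hm2; omega
      refine ⟨((0 : Int) + (k : Int), ids[k]),
        (pv_mem_enumerate ids 0 _).mpr ⟨k, hk, rfl⟩, q.2, ?_, by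
          rw [Prod.ext_iff]; exact ⟨hk1.symm, rfl⟩⟩
      rw [PySem.List.slice_from ids (show (0:Int) ≤ (0 : Int) + (k : Int) + 1 by omega)]
      rw [show ((0 : Int) + (k : Int) + 1).toNat = k + 1 by omega]
      refine List.mem_iff_getElem?.mpr ⟨m - (k + 1), ?_⟩
      rw [List.getElem?_drop]
      rw [show k + 1 + (m - (k + 1)) = m from by omega]
      exact List.getElem?_eq_some_iff.mpr ⟨hm, hm2⟩

lemma pv_idsOf_mem (cs : List (List Int)) :
    ∀ (s x a : Int), a ∈ pvIdsOf cs s x ↔ ∃ i, ∃ h : i < cs.length, a = s + (i : Int) ∧ x ∈ cs[i] := by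
  induction cs with
  | nil => simp [pvIdsOf]
  | cons c t ih =>
    intro s x a
    simp only [pvIdsOf, List.mem_append, ih]
    constructor
    · rintro (ha | ⟨i, hi, rfl, hx⟩)
      · have hx : x ∈ c ∧ a = s := by
          by_cases h : x ∈ c <;> simp [h] at ha <;> simp [h, ha]
        exact ⟨0, by simp, by simp [hx.2], by simpa using hx.1⟩
      · exact ⟨i + 1, by simpa using hi, by push_cast; ring, by simpa using hx⟩
    · rintro ⟨i, hi, rfl, hx⟩
      cases i with
      | zero => left; simp at hx; simp [hx]
      | succ i =>
        right
        exact ⟨i, by simpa using hi, by push_cast; ring, by simpa using hx⟩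

lemma pv_idsOf_lb (cs : List (List Int)) :
    ∀ (s x a : Int), a ∈ pvIdsOf cs s x → s ≤ a := by
  intro s x a ha
  obtain ⟨i, hi, rfl, -⟩ := (pv_idsOf_mem cs s x a).mp ha
  omega

lemma pv_idsOf_sorted (cs : List (List Int)) :
    ∀ (s x : Int), (pvIdsOf cs s x).Pairwise (· < ·) := by
  induction cs with
  | nil => intro s x; simp [pvIdsOf]
  | cons c t ih =>
    intro s x
    unfold pvIdsOf
    apply List.pairwise_append.mpr
    refine ⟨by by_cases h : x ∈ c <;> simp [h], ih (s + 1) x, ?_⟩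
    intro a ha b hb
    have hb' := pv_idsOf_lb t (s + 1) x b hb
    have ha' : a = s := by by_cases h : x ∈ c <;> simp [h] at ha; exact ha
    omega

-- the inverted-index loop computes pvIdsOf (needs Nodup of each component)
lemma pv_index_loop_getD (cs : List (List Int)) :
    ∀ (s : Int) (d : PySem.Dict Int (List Int)) (x : Int), (∀ c ∈ cs, c.Nodup) →
      ((PySem.List.enumerate cs s).foldl
          (fun d p => p.2.foldl (fun d x => d.modify x [] (fun v => v ++ [p.1])) d) d).getD x []
        = d.getD x [] ++ pvIdsOf cs s x := by
  induction cs with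
  | nil => intro s d x _; simp [PySem.List.enumerate, pvIdsOf]
  | cons c t ih =>
    intro s d x hnd
    rw [PySem.List.enumerate_cons, List.foldl_cons]
    rw [ih (s + 1) _ x (fun c' hc' => hnd c' (by simp [hc']))]
    have hstep : (c.foldl (fun d x => d.modify x [] (fun v => v ++ [s])) d).getD x []
        = d.getD x [] ++ (if x ∈ c then [s] else []) := by
      have hmap : c.foldl (fun d x => d.modify x [] (fun v => v ++ [s])) d
          = (c.map (fun y => (y, s))).foldl (fun d p => d.modify p.1 [] (fun v => v ++ [p.2])) d := by
        rw [List.foldl_map]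
      rw [hmap, PySem.Dict.getD_foldl_modify_append]
      congr 1
      rw [List.filter_map, List.map_map]
      have hcnd := hnd c (by simp)
      by_cases h : x ∈ c
      · have hf : c.filter (fun y => y == x) = [x] := by
          rw [List.filter_beq x, List.count_eq_one_of_mem hcnd h]
          simp
        simp [Function.comp_def, hf, h]
      · have hf : c.filter (fun y => y == x) = [] := by
          rw [List.filter_beq x, List.count_eq_zero.mpr h]
          simp
        simp [Function.comp_def, hf, h]
    rw [hstep, pvIdsOf, List.append_assoc]

lemma pv_index_keys_nodup (cs : List (List Int)) :
    ∀ (s : Int) (d : PySem.Dict Int (List Int)), d.keys.Nodup →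
      ((PySem.List.enumerate cs s).foldl
          (fun d p => p.2.foldl (fun d x => d.modify x [] (fun v => v ++ [p.1])) d) d).keys.Nodup := by
  induction cs with
  | nil => intro s d hd; simpa [PySem.List.enumerate] using hd
  | cons c t ih =>
    intro s d hd
    rw [PySem.List.enumerate_cons, List.foldl_cons]
    exact ih (s + 1) _
      (PySem.Dict.nodup_keys_foldl_modify_key c (fun y => y) [] (fun _ _ v => v ++ [s]) d hd)

lemma pv_index_keys_mem (cs : List (List Int)) :
    ∀ (s : Int) (d : PySem.Dict Int (List Int)) (x : Int),
      x ∈ ((PySem.List.enumerate cs s).foldl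
          (fun d p => p.2.foldl (fun d x => d.modify x [] (fun v => v ++ [p.1])) d) d).keys
        ↔ x ∈ d.keys ∨ ∃ c ∈ cs, x ∈ c := by
  induction cs with
  | nil => intro s d x; simp [PySem.List.enumerate]
  | cons c t ih =>
    intro s d x
    rw [PySem.List.enumerate_cons, List.foldl_cons, ih]
    have hk : (c.foldl (fun d x => d.modify x [] (fun v => v ++ [s])) d).keys
        = PySem.Set.update d.keys (c.map (fun y => y)) :=
      PySem.Dict.keys_foldl_modify_key c (fun y => y) [] (fun _ _ v => v ++ [s]) d
    rw [hk]
    rw [PySem.Set.mem_update]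
    simp only [List.map_id', List.mem_cons]
    constructor
    · rintro ((hd | hc) | ⟨c', hc', hx⟩)
      · exact Or.inl hd
      · exact Or.inr ⟨c, Or.inl rfl, hc⟩
      · exact Or.inr ⟨c', Or.inr hc', hx⟩
    · rintro (hd | ⟨c', (rfl | hc'), hx⟩)
      · exact Or.inl (Or.inl hd)
      · exact Or.inl (Or.inr hx)
      · exact Or.inr ⟨c', hc', hx⟩

-- members of A's pair list
lemma pv_mem_pairsA (components : List (List Int)) (q : Int × Int) :
    q ∈ pvPairsA components
      ↔ ∃ i j : Nat, i < j ∧ j < components.length ∧ pvHit components i j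
          ∧ q = ((i : Int), (j : Int)) := by
  unfold pvPairsA
  constructor
  · intro hq
    rw [List.mem_flatMap] at hq
    obtain ⟨i, hi, hq⟩ := hq
    rw [List.mem_map] at hq
    obtain ⟨j, hj, rfl⟩ := hq
    rw [List.mem_filter] at hj
    rw [List.mem_range] at hi
    have hj' := List.mem_range'_1.mp hj.1
    exact ⟨i, j, by omega, by omega, hj.2, rfl⟩
  · rintro ⟨i, j, hij, hjn, hhit, rfl⟩
    rw [List.mem_flatMap]
    refine ⟨i, List.mem_range.mpr (by omega), ?_⟩
    rw [List.mem_map]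
    exact ⟨j, List.mem_filter.mpr ⟨List.mem_range'_1.mpr (by omega), hhit⟩, rfl⟩

-- members of B's pair set
lemma pv_mem_pairsB (components : List (List Int)) (q : Int × Int)
    (hnd : ∀ c ∈ components, c.Nodup) :
    q ∈ pvPairs (pvIndex components).values
      ↔ ∃ x : Int, q.1 ∈ pvIdsOf components 0 x ∧ q.2 ∈ pvIdsOf components 0 x ∧ q.1 < q.2 := by
  have hkeysnd : (pvIndex components).keys.Nodup := by
    unfold pvIndex
    exact pv_index_keys_nodup components 0 PySem.Dict.empty (by simp)
  have hvals : (pvIndex components).values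
      = (pvIndex components).keys.map (fun k => (pvIndex components).getD k []) :=
    PySem.Dict.values_eq_map_keys _ hkeysnd []
  have hgetD : ∀ x : Int, (pvIndex components).getD x [] = pvIdsOf components 0 x := by
    intro x
    unfold pvIndex
    rw [pv_index_loop_getD components 0 PySem.Dict.empty x hnd, PySem.Dict.getD_empty]
    simp
  unfold pvPairs
  rw [pv_mem_foldl_set _ _
      (fun ids q => q.1 ∈ ids ∧ q.2 ∈ ids ∧ q.1 < q.2)
      (fun s ids hids q => by
        rw [hvals, List.mem_map] at hids
        obtain ⟨x, -, rfl⟩ := hids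
        rw [hgetD x]
        exact pv_mem_pairsOf _ (pv_idsOf_sorted components 0 x) s q)]
  simp only [PySem.Set.empty, List.not_mem_nil, false_or]
  constructor
  · rintro ⟨ids, hids, hq⟩
    rw [hvals, List.mem_map] at hids
    obtain ⟨x, -, rfl⟩ := hids
    rw [hgetD x] at hq
    exact ⟨x, hq⟩
  · rintro ⟨x, h1, h2, hlt⟩
    have hxk : x ∈ (pvIndex components).keys := by
      obtain ⟨i, hi, -, hxi⟩ := (pv_idsOf_mem components 0 x _).mp h1
      unfold pvIndex
      rw [pv_index_keys_mem]
      exact Or.inr ⟨components[i], List.getElem_mem hi, hxi⟩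
    refine ⟨pvIdsOf components 0 x, ?_, h1, h2, hlt⟩
    rw [hvals, List.mem_map]
    exact ⟨x, hxk, hgetD x⟩

-- A's pair list is strictly increasing in the Lex order
lemma pv_pairsA_pairwise (components : List (List Int)) :
    (pvPairsA components).Pairwise (fun p q => toLex p < toLex q) := by
  unfold pvPairsA
  rw [List.pairwise_flatMap]
  constructor
  · intro i _
    rw [List.pairwise_map]
    apply List.Pairwise.imp (R := (· < ·))
    · intro a b hab
      rw [Prod.Lex.lt_iff]
      right
      refine ⟨rfl, ?_⟩
      simp only [ofLex_toLex]
      exact_mod_cast hab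
    · exact List.Pairwise.filter _ (List.pairwise_lt_range' (step := 1))
  · apply List.Pairwise.imp (R := (· < ·)) _ List.pairwise_lt_range
    intro a b hab
    intro x hx y hy
    simp only [List.mem_map, List.mem_filter] at hx hy
    obtain ⟨j1, -, rfl⟩ := hx
    obtain ⟨j2, -, rfl⟩ := hy
    rw [Prod.Lex.lt_iff]
    left
    simp only [ofLex_toLex]
    exact_mod_cast hab

lemma pv_pairsB_nodup (vals : List (List Int)) : (pvPairs vals).Nodup := by
  unfold pvPairs
  apply pv_nodup_foldl_set
  · intro s ids hs
    apply pv_nodup_foldl_set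
    · intro s' p hs'
      apply pv_nodup_foldl_set
      · intro s'' b hs''
        exact PySem.Set.nodup_add s'' _ hs''
      · exact hs'
    · exact hs
  · simp [PySem.Set.empty]

-- the central identity: sorting B's pair set gives A's pair list
lemma pv_sorted_pairs_eq (components : List (List Int)) (hnd : ∀ c ∈ components, c.Nodup) :
    PySem.List.sorted (pvPairs (pvIndex components).values) (fun p => toLex p)
      = pvPairsA components := by
  apply PySem.List.sorted_eq_of_perm_of_pairwise_lt
  · apply (List.perm_ext_iff_of_nodup ?_ (pv_pairsB_nodup _)).mpr
    · intro q
      rw [pv_mem_pairsA, pv_mem_pairsB components q hnd]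
      constructor
      · rintro ⟨i, j, hij, hjn, hhit, rfl⟩
        simp only [pvHit, List.any_eq_true] at hhit
        obtain ⟨x, hxi, hxj⟩ := hhit
        rw [List.contains_iff_mem] at hxj
        rw [List.getD_eq_getElem?_getD, List.getElem?_eq_getElem (by omega)] at hxi hxj
        simp only [Option.getD_some] at hxi hxj
        refine ⟨x, ?_, ?_, by
          simpa using (show (i : Int) < (j : Int) from by exact_mod_cast hij)⟩
        · exact (pv_idsOf_mem components 0 x _).mpr ⟨i, by omega, by simp, hxi⟩
        · exact (pv_idsOf_mem components 0 x _).mpr ⟨j, by omega, by simp, hxj⟩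
      · rintro ⟨x, h1, h2, hlt⟩
        obtain ⟨i, hi, hq1, hxi⟩ := (pv_idsOf_mem components 0 x _).mp h1
        obtain ⟨j, hj, hq2, hxj⟩ := (pv_idsOf_mem components 0 x _).mp h2
        simp only [zero_add] at hq1 hq2
        refine ⟨i, j, ?_, hj, ?_, ?_⟩
        · rw [hq1, hq2] at hlt; exact_mod_cast hlt
        · simp only [pvHit, List.any_eq_true]
          refine ⟨x, ?_, ?_⟩
          · rw [List.getD_eq_getElem?_getD, List.getElem?_eq_getElem hi]; simpa using hxi
          · rw [List.contains_iff_mem, List.getD_eq_getElem?_getD, List.getElem?_eq_getElem hj]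
            simpa using hxj
        · rw [Prod.ext_iff]; exact ⟨hq1, hq2⟩
    · apply List.Pairwise.imp _ (pv_pairsA_pairwise components)
      intro a b hab
      intro hEq
      rw [hEq] at hab
      exact lt_irrefl _ hab
  · exact pv_pairsA_pairwise components

-- ===== VERDICT (by name: the statement is the Claim_ definition above) =====
theorem add_virtual_edges_spec : Claim_equal_add_virtual_edges := by
  intro components _ hpre
  unfold Spec_add_virtual_edges
  rw [pv_A_eq_flatMap, pv_B_eq_flatMap, pv_sorted_pairs_eq components hpre]
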